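-- pv_equiv track=rewrite | github.com/LilySu/GLM-5-Decoupled-From-HuggingFace | data/sample_data.py | make_conversation
-- ===== SOURCE A (Python) =====
-- EOS_ID = 1           # <|endoftext|> / end of sequence
--
-- IM_START_ID = 10     # <|im_start|>
--
-- IM_END_ID = 11       # <|im_end|>
--
-- NEWLINE_ID = 12      # \n
--
-- SYSTEM_ID = 20       # "system"
--
-- USER_ID = 21         # "user"
--
-- ASSISTANT_ID = 22    # "assistant"
--
-- CONTENT_TOKENS = list(range(100, 200))
--
-- IGNORE_INDEX = -100  # PyTorch cross_entropy ignore value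
--
-- def _make_content(length):
--     """Generate a sequence of fake content tokens of given length."""
--     return [CONTENT_TOKENS[i % len(CONTENT_TOKENS)] for i in range(length)]
--
-- def make_chat_turn(role_id, content_length):
--     """Build one ChatML turn: <|im_start|> role \\n content \\n <|im_end|> \\n
--
--     Returns (token_ids, is_assistant) where is_assistant marks which tokens
--     are part of the assistant response (for label masking).
--     """
--     content = _make_content(content_length)
--     tokens = [IM_START_ID, role_id, NEWLINE_ID] + content + [NEWLINE_ID, IM_END_ID, NEWLINE_ID]
--     is_assistant = [role_id == ASSISTANT_ID] * len(tokens)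
--     return tokens, is_assistant
--
-- def make_conversation(system_len=3, user_len=8, assistant_len=6):
--     """Build a single-turn ChatML conversation (system + user + assistant).
--
--     Returns:
--         input_ids: list[int] — the full token sequence
--         labels:    list[int] — same as input_ids but with -100 on non-assistant tokens
--     """
--     sys_tokens, sys_mask = make_chat_turn(SYSTEM_ID, system_len)
--     usr_tokens, usr_mask = make_chat_turn(USER_ID, user_len)
--     ast_tokens, ast_mask = make_chat_turn(ASSISTANT_ID, assistant_len)
--
--     input_ids = sys_tokens + usr_tokens + ast_tokens + [EOS_ID]
--     is_assistant = sys_mask + usr_mask + ast_mask + [False]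
--
--     labels = []
--     for tok, is_ast in zip(input_ids, is_assistant):
--         if is_ast:
--             labels.append(tok)
--         elif tok == EOS_ID and input_ids[-1] == EOS_ID:
--             labels.append(tok)
--         else:
--             labels.append(IGNORE_INDEX)
--
--     return input_ids, labels
-- ===== SOURCE B (Python) =====
-- EOS_ID = 1
-- IM_START_ID = 10
-- IM_END_ID = 11
-- NEWLINE_ID = 12
-- SYSTEM_ID = 20
-- USER_ID = 21
-- ASSISTANT_ID = 22
-- IGNORE_INDEX = -100
--
-- def _turn_tokens(role_id, content_length):
--     """One ChatML turn's token ids (no mask needed)."""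
--     content = [100 + i % 100 for i in range(content_length)]
--     return [IM_START_ID, role_id, NEWLINE_ID] + content + [NEWLINE_ID, IM_END_ID, NEWLINE_ID]
--
-- def make_conversation(system_len=3, user_len=8, assistant_len=6):
--     sys_tokens = _turn_tokens(SYSTEM_ID, system_len)
--     usr_tokens = _turn_tokens(USER_ID, user_len)
--     ast_tokens = _turn_tokens(ASSISTANT_ID, assistant_len)
--     input_ids = sys_tokens + usr_tokens + ast_tokens + [EOS_ID]
--     # labels: ignore everything except the assistant turn and the trailing EOS,
--     # assembled by block concatenation instead of a per-token mask pass
--     labels = [IGNORE_INDEX] * (len(sys_tokens) + len(usr_tokens)) + ast_tokens + [EOS_ID]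
--     return input_ids, labels
-- ===== Notes on version B (the rewrite author's own statement) =====
-- stated objective: simpler
-- what changed: B drops the per-turn boolean masks and the per-token zip/conditional labelling pass entirely: since the three turns are contiguous blocks, labels are assembled directly as [IGNORE]*(len(sys)+len(usr)) + ast_tokens + [EOS], and content is computed arithmetically (100 + i%100) instead of indexing into CONTENT_TOKENS.
import Mathlib
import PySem

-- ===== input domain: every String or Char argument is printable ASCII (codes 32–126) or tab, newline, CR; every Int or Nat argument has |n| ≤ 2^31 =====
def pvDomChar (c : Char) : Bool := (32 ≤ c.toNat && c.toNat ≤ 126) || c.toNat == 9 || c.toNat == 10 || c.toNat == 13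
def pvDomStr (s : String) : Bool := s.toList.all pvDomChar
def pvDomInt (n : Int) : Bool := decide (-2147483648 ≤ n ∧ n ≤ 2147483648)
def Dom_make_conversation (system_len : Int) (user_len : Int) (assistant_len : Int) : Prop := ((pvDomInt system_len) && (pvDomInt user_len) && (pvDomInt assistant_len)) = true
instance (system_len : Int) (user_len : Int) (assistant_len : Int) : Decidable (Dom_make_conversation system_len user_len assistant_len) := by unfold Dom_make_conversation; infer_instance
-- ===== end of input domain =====

-- B replaces A's per-token zip/mask labelling pass by direct block concatenation of the labels
-- (ignore-prefix ++ assistant turn ++ EOS) and computes content tokens arithmetically: simpler, same cost.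


-- ===== PORT A =====
-- CONTENT_TOKENS = list(range(100, 200))
def pvCONTENT_TOKENS : List Int := PySem.List.pyRange 100 200 1

-- _make_content: [CONTENT_TOKENS[i % len(CONTENT_TOKENS)] for i in range(length)]
-- (the pyGetD default 0 is a totality guard only: i % 100 is always in range)
def pvMakeContent (length : Int) : List Int :=
  (PySem.List.pyRange 0 length 1).map
    (fun i => PySem.List.pyGetD pvCONTENT_TOKENS (PySem.Int.mod i 100) 0)

-- make_chat_turn(role_id, content_length)
def pvMakeChatTurn (role_id : Int) (content_length : Int) : List Int × List Bool :=
  let content := pvMakeContent content_length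
  let tokens := [10, role_id, 12] ++ content ++ [12, 11, 12]
  let is_assistant := List.replicate tokens.length (role_id == 22)
  (tokens, is_assistant)

def make_conversation (system_len : Int) (user_len : Int) (assistant_len : Int) : List Int × List Int :=
  let st := pvMakeChatTurn 20 system_len
  let ut := pvMakeChatTurn 21 user_len
  let at_ := pvMakeChatTurn 22 assistant_len
  let input_ids := st.1 ++ ut.1 ++ at_.1 ++ [1]
  let is_assistant := st.2 ++ ut.2 ++ at_.2 ++ [false]
  let labels := (input_ids.zip is_assistant).foldl
    (fun acc p =>
      if p.2 then acc ++ [p.1]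
      else if p.1 == 1 && (PySem.List.pyGetD input_ids (-1) 0 == 1) then acc ++ [p.1]
      else acc ++ [-100]) []
  (input_ids, labels)

-- ===== PORT B =====
-- _turn_tokens(role_id, content_length): one turn's tokens, content = 100 + i % 100
def pvTurnTokens (role_id : Int) (content_length : Int) : List Int :=
  [10, role_id, 12]
    ++ (PySem.List.pyRange 0 content_length 1).map (fun i => 100 + PySem.Int.mod i 100)
    ++ [12, 11, 12]

def make_conversation_alt (system_len : Int) (user_len : Int) (assistant_len : Int) : List Int × List Int :=
  let sys_tokens := pvTurnTokens 20 system_len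
  let usr_tokens := pvTurnTokens 21 user_len
  let ast_tokens := pvTurnTokens 22 assistant_len
  let input_ids := sys_tokens ++ usr_tokens ++ ast_tokens ++ [1]
  let labels := List.replicate (sys_tokens.length + usr_tokens.length) (-100) ++ ast_tokens ++ [1]
  (input_ids, labels)

-- ===== PRECONDITION & SPEC =====
def Spec_make_conversation (system_len : Int) (user_len : Int) (assistant_len : Int) (out : List Int × List Int) : Prop := out = make_conversation_alt system_len user_len assistant_len
instance (system_len : Int) (user_len : Int) (assistant_len : Int) (out : List Int × List Int) : Decidable (Spec_make_conversation system_len user_len assistant_len out) := by unfold Spec_make_conversation; infer_instance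

-- ===== CLAIM (what is proved, stated in full; the proofs are below) =====
def Claim_equal_make_conversation : Prop := ∀ (system_len : Int) (user_len : Int) (assistant_len : Int), Dom_make_conversation system_len user_len assistant_len → Spec_make_conversation system_len user_len assistant_len (make_conversation system_len user_len assistant_len)

-- ===== LEMMAS AND PROOFS =====


-- A's content (indexing CONTENT_TOKENS at i % 100) equals B's arithmetic content 100 + i % 100
theorem content_eq (n : Int) :
    pvMakeContent n = (PySem.List.pyRange 0 n 1).map (fun i => 100 + PySem.Int.mod i 100) := by
  apply List.map_congr_left
  intro i _
  have hm0 : 0 ≤ PySem.Int.mod i 100 := PySem.Int.mod_nonneg i (by norm_num)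
  have hm1 : PySem.Int.mod i 100 < 100 := PySem.Int.mod_lt i (by norm_num)
  have hlen : pvCONTENT_TOKENS.length = 100 := by
    simp [pvCONTENT_TOKENS, PySem.List.length_pyRange_one]
  rw [PySem.List.pyGetD_eq_getElem _ _ hm0 (by omega)]
  simp only [pvCONTENT_TOKENS, PySem.List.getElem_pyRange_one]
  omega

-- A's turn (tokens, mask) equals (B's turn tokens, an all-(role==22) mask of the same length)
theorem turn_eq (r n : Int) :
    pvMakeChatTurn r n = (pvTurnTokens r n, List.replicate (pvTurnTokens r n).length (r == 22)) := by
  simp only [pvMakeChatTurn, pvTurnTokens, content_eq]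

-- no token of a non-assistant-role turn is the EOS id 1
theorem turn_ne_one (r n : Int) (hr : r ≠ 1) : ∀ t ∈ pvTurnTokens r n, t ≠ 1 := by
  intro t ht h1
  subst h1
  simp only [pvTurnTokens, List.mem_append, List.mem_cons, List.mem_map,
    List.not_mem_nil, or_false] at ht
  rcases ht with ((h | h | h) | ⟨i, _, hi⟩) | (h | h | h)
  all_goals first
    | omega
    | exact hr h.symm
    | (have := PySem.Int.mod_nonneg i (b := 100) (by norm_num); omega)

theorem zip_replicate_right (xs : List Int) (b : Bool) :
    xs.zip (List.replicate xs.length b) = xs.map (fun t => (t, b)) := by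
  induction xs with
  | nil => rfl
  | cons x t ih => simp [List.replicate_succ, ih]

-- A's zip/mask labelling pass produces exactly B's block-concatenated labels
theorem labels_eq (S U A : List Int)
    (hS : ∀ t ∈ S, t ≠ 1) (hU : ∀ t ∈ U, t ≠ 1) :
    ((S ++ U ++ A ++ [1]).zip
       (List.replicate S.length false ++ List.replicate U.length false
         ++ List.replicate A.length true ++ [false])).foldl
      (fun (acc : List Int) (p : Int × Bool) =>
        if p.2 then acc ++ [p.1]
        else if p.1 == 1 && (PySem.List.pyGetD (S ++ U ++ A ++ [1]) (-1) 0 == 1) then acc ++ [p.1]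
        else acc ++ [-100]) []
    = List.replicate (S.length + U.length) (-100) ++ A ++ [1] := by
  have hlast : PySem.List.pyGetD (S ++ U ++ A ++ [1]) (-1) 0 = 1 :=
    PySem.List.pyGetD_neg_one_append_singleton (S ++ U ++ A) 1 0
  rw [hlast]
  have hfun : (fun (acc : List Int) (p : Int × Bool) =>
        if p.2 then acc ++ [p.1]
        else if p.1 == 1 && ((1:Int) == 1) then acc ++ [p.1]
        else acc ++ [-100])
      = (fun acc p => acc ++ [if p.2 then p.1 else if p.1 == 1 then p.1 else -100]) := by
    funext acc p
    by_cases h : p.2 <;> by_cases h2 : p.1 == 1 <;> simp [h, h2]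
  rw [hfun, PySem.List.foldl_append_singleton_eq_map]
  rw [List.zip_append (by simp; omega), List.zip_append (by simp), List.zip_append (by simp)]
  rw [zip_replicate_right, zip_replicate_right, zip_replicate_right]
  simp only [List.map_append, List.map_map]
  have mS : ∀ (L : List Int), (∀ t ∈ L, t ≠ 1) →
      L.map ((fun p : Int × Bool => if p.2 then p.1 else if p.1 == 1 then p.1 else -100)
               ∘ fun t => (t, false)) = List.replicate L.length (-100) := by
    intro L hL
    rw [← List.map_const]
    apply List.map_congr_left
    intro t ht
    simp [hL t ht, Function.const]
  rw [mS S hS, mS U hU]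
  have mA : A.map ((fun p : Int × Bool => if p.2 then p.1 else if p.1 == 1 then p.1 else -100)
               ∘ fun t => (t, true)) = A := by
    have : ((fun p : Int × Bool => if p.2 then p.1 else if p.1 == 1 then p.1 else -100)
               ∘ fun t => (t, true)) = id := by
      funext t; simp
    rw [this, List.map_id]
  rw [mA]
  rw [← List.replicate_add]
  simp

theorem make_conversation_spec_aux (s u a : Int) :
    make_conversation s u a = make_conversation_alt s u a := by
  unfold make_conversation make_conversation_alt
  simp only [turn_eq, Prod.mk.injEq,
    show ((20:Int) == 22) = false from rfl,
    show ((21:Int) == 22) = false from rfl,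
    show ((22:Int) == 22) = true from rfl]
  exact ⟨trivial, labels_eq _ _ _ (turn_ne_one 20 s (by norm_num)) (turn_ne_one 21 u (by norm_num))⟩

-- ===== VERDICT (by name: the statement is the Claim_ definition above) =====
theorem make_conversation_spec : Claim_equal_make_conversation := by
  intro s u a _
  exact make_conversation_spec_aux s u a
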